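-- pv_equiv track=rewrite | github.com/twalen/RankBorderedWords | src/rank_unrank/texts.py | calc_X_naive
-- ===== SOURCE A (Python) =====
-- from typing import Union, Optional
--
-- def calc_pi(seq: list[int]) -> list[int]:
--     """Calculates prefix function of a sequence
--     pi[i] = max(l : 0 <= l <= i && seq[:l] == seq[-l-i:i])
--
--     Time complexity: O(n)"""
--     n = len(seq)
--     pi = [0] * n
--     for i, c in enumerate(seq[1:], start=1):
--         j = pi[i - 1]
--         while j > 0 and seq[j] != c:
--             j = pi[j - 1]
--         if seq[j] == c:
--             j += 1
--         pi[i] = j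
--     return pi
--
-- def is_bordered(seq: list[int]) -> bool:
--     """Returns true if a sequence has a border (non empty prefix that is also an suffix)
--
--     Time complexity: O(n)"""
--     if len(seq) > 0:
--         pi = calc_pi(seq)
--         return pi[len(seq) - 1] != 0
--     else:
--         return False
--
-- def calc_X_naive(u: Union[list[int], tuple[int]], k: int) -> list[int]:
--     """returns sorted list of charactes c, such that u+c is bordered"""
--     if isinstance(u, tuple):
--         u = list(u)
--     res = []
--     for c in range(1, k + 1):
--         if is_bordered(u + [c]):
--             res.append(c)
--     return res
-- ===== SOURCE B (Python) =====
-- def _prefix_function(u):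
--     n = len(u)
--     pi = [0] * n
--     for i in range(1, n):
--         j = pi[i - 1]
--         while j > 0 and u[j] != u[i]:
--             j = pi[j - 1]
--         if u[j] == u[i]:
--             j += 1
--         pi[i] = j
--     return pi
--
--
-- def calc_X_naive(u, k):
--     """returns sorted list of characters c, such that u+[c] is bordered
--
--     Computes the prefix function of u once and collects u[b] over the
--     failure-link border lengths b (plus b = 0), instead of running the
--     whole prefix-function computation for every candidate c."""
--     u = list(u)
--     n = len(u)
--     if n == 0:
--         return []
--     pi = _prefix_function(u)
--     cands = {u[0]}
--     b = pi[n - 1]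
--     while b > 0:
--         cands.add(u[b])
--         b = pi[b - 1]
--     return sorted(c for c in cands if 1 <= c <= k)
-- ===== Notes on version B (the rewrite author's own statement) =====
-- stated objective: faster
-- what changed: B computes the prefix function of u once and collects u[b] over the failure-link border lengths b (plus b=0), then sorts, instead of recomputing the whole prefix function of u+[c] for every candidate c in range(1,k+1).
import Mathlib
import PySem

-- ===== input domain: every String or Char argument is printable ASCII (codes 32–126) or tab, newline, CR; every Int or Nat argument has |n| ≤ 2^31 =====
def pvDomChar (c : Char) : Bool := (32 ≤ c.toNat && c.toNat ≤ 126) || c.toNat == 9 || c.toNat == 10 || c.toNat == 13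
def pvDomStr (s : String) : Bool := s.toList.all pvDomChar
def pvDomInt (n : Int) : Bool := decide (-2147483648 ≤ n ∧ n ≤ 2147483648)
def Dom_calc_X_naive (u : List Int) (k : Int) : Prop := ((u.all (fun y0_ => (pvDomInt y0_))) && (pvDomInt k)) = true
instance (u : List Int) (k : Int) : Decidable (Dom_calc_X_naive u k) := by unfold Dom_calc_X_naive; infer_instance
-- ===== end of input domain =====

-- B computes the prefix function of u once and reads the answer off the failure-link chain,
-- instead of recomputing the whole prefix function of u+[c] for every candidate c (objective: faster).

-- list accesses are in range on every real execution (pi[i] ≤ i invariant), so getD is exact here.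
def kmpStep (seq pi : List Int) (c : Int) : Nat → Int → Int
  | 0, j => j
  | fuel+1, j => if j > 0 ∧ seq.getD j.toNat 0 ≠ c then kmpStep seq pi c fuel (pi.getD (j.toNat - 1) 0) else j

-- one iteration of the 'for i, c in enumerate(seq[1:], 1)' body; pi grows by one entry per step
def piStep (seq : List Int) (pi : List Int) (i : Nat) : List Int :=
  let c := seq.getD i 0
  let j := kmpStep seq pi c seq.length (pi.getD (i-1) 0)
  pi ++ [if seq.getD j.toNat 0 = c then j + 1 else j]

def calcPi (seq : List Int) : List Int :=
  if seq.length = 0 then [] else (List.range' 1 (seq.length - 1)).foldl (piStep seq) [0]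

def isBordered (seq : List Int) : Bool :=
  if seq.length > 0 then (calcPi seq).getD (seq.length - 1) 0 != 0 else false

def calc_X_naive (u : List Int) (k : Int) : List Int :=
  (PySem.List.pyRange 1 (k+1) 1).foldl (fun res c => if isBordered (u ++ [c]) then res ++ [c] else res) []

-- ===== PORT B =====
-- the failure-link chain pi[n-1], pi[pi[n-1]-1], …, stopping at 0 (positive entries only)
def chainGo (pi : List Int) : Nat → Int → List Int
  | 0, _ => []
  | fuel+1, b => if b > 0 then b :: chainGo pi fuel (pi.getD (b.toNat - 1) 0) else []

def calc_X_naive_alt (u : List Int) (k : Int) : List Int :=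
  if u.length = 0 then [] else
  let pi := calcPi u
  let cands := PySem.Set.ofList
    (u.getD 0 0 :: (chainGo pi u.length (pi.getD (u.length - 1) 0)).map (fun b => u.getD b.toNat 0))
  PySem.List.sorted (cands.filter (fun c => 1 ≤ c ∧ c ≤ k)) (fun x => x) false

-- ===== PRECONDITION & SPEC =====
def Spec_calc_X_naive (u : List Int) (k : Int) (out : List Int) : Prop := out = calc_X_naive_alt u k
instance (u : List Int) (k : Int) (out : List Int) : Decidable (Spec_calc_X_naive u k out) := by unfold Spec_calc_X_naive; infer_instance

-- ===== CLAIM (what is proved, stated in full; the proofs are below) =====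
def Claim_equal_calc_X_naive : Prop := ∀ (u : List Int) (k : Int), Dom_calc_X_naive u k → Spec_calc_X_naive u k (calc_X_naive u k)

-- ===== LEMMAS AND PROOFS =====

def PiOk (pi : List Int) : Prop := ∀ i (h : i < pi.length), 0 ≤ pi[i] ∧ pi[i] ≤ (i : Int)

theorem piOk_getD {pi : List Int} (hok : PiOk pi) {i : Nat} (h : i < pi.length) :
    0 ≤ pi.getD i 0 ∧ pi.getD i 0 ≤ (i : Int) := by
  rw [List.getD_eq_getElem pi 0 h]; exact hok i h

theorem kmpStep_zero (seq pi : List Int) (c : Int) (f : Nat) : kmpStep seq pi c f 0 = 0 := by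
  cases f <;> simp [kmpStep]

theorem kmpStep_fuel (seq pi : List Int) (c : Int) (f1 f2 : Nat) (j : Int)
    (hok : PiOk pi) (hj0 : 0 ≤ j) (h1 : j.toNat ≤ f1) (h2 : j.toNat ≤ f2) (hjl : j.toNat < pi.length) :
    kmpStep seq pi c f1 j = kmpStep seq pi c f2 j := by
  induction f1 generalizing f2 j with
  | zero =>
    have : j = 0 := by omega
    subst this; rw [kmpStep_zero, kmpStep_zero]
  | succ g ih =>
    by_cases hc : j > 0 ∧ seq.getD j.toNat 0 ≠ c
    · obtain ⟨hb1, hb2⟩ := piOk_getD hok (i := j.toNat - 1) (by omega)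
      cases f2 with
      | zero => omega
      | succ g' =>
        simp only [kmpStep, if_pos hc]
        exact ih g' (pi.getD (j.toNat - 1) 0) hb1 (by omega) (by omega) (by omega)
    · cases f2 with
      | zero =>
        have : j = 0 := by omega
        subst this; rw [kmpStep_zero, kmpStep_zero]
      | succ g' => simp only [kmpStep, if_neg hc]

theorem chainGo_fuel (pi : List Int) (f1 f2 : Nat) (j : Int)
    (hok : PiOk pi) (hj0 : 0 ≤ j) (h1 : j.toNat ≤ f1) (h2 : j.toNat ≤ f2) (hjl : j.toNat < pi.length) :
    chainGo pi f1 j = chainGo pi f2 j := by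
  induction f1 generalizing f2 j with
  | zero =>
    have : j = 0 := by omega
    cases f2 <;> simp [chainGo, this]
  | succ g ih =>
    by_cases hc : j > 0
    · obtain ⟨hb1, hb2⟩ := piOk_getD hok (i := j.toNat - 1) (by omega)
      cases f2 with
      | zero => omega
      | succ g' =>
        have hrec := ih g' (pi.getD (j.toNat - 1) 0) hb1 (by omega) (by omega) (by omega)
        simp only [chainGo, if_pos hc, hrec]
    · have : j = 0 := by omega
      cases f2 <;> simp [chainGo, this]

theorem kmpStep_congr (seq seq' pi : List Int) (c : Int) (fuel : Nat) (j : Int)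
    (hagree : ∀ i, i < pi.length → seq.getD i 0 = seq'.getD i 0)
    (hok : PiOk pi) (hj0 : 0 ≤ j) (hjl : j.toNat < pi.length) :
    kmpStep seq pi c fuel j = kmpStep seq' pi c fuel j := by
  induction fuel generalizing j with
  | zero => rfl
  | succ g ih =>
    have hag : seq.getD j.toNat 0 = seq'.getD j.toNat 0 := hagree _ hjl
    by_cases hc : j > 0 ∧ seq.getD j.toNat 0 ≠ c
    · obtain ⟨hb1, hb2⟩ := piOk_getD hok (i := j.toNat - 1) (by omega)
      simp only [kmpStep, if_pos hc, if_pos (hag ▸ hc)]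
      exact ih (pi.getD (j.toNat - 1) 0) hb1 (by omega)
    · rw [hag] at hc
      simp only [kmpStep, if_neg (hag ▸ hc), if_neg hc]

theorem kmp_chain (seq pi : List Int) (c : Int) (fuel : Nat) (j : Int)
    (hok : PiOk pi) (hj0 : 0 ≤ j) (hjf : j.toNat ≤ fuel) (hjl : j.toNat < pi.length) :
    (0 ≤ kmpStep seq pi c fuel j ∧ (kmpStep seq pi c fuel j).toNat < pi.length) ∧
    (seq.getD (kmpStep seq pi c fuel j).toNat 0 = c ∨ kmpStep seq pi c fuel j = 0) ∧
    (seq.getD (kmpStep seq pi c fuel j).toNat 0 = c ↔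
      (seq.getD 0 0 = c ∨ ∃ b ∈ chainGo pi fuel j, seq.getD b.toNat 0 = c)) := by
  induction fuel generalizing j with
  | zero =>
    have : j = 0 := by omega
    subst this
    refine ⟨⟨le_refl 0, by simpa using hjl⟩, ?_, by simp [chainGo, kmpStep]⟩
    by_cases h : seq.getD (Int.toNat 0) 0 = c
    · exact Or.inl h
    · exact Or.inr rfl
  | succ g ih =>
    by_cases hc : j > 0 ∧ seq.getD j.toNat 0 ≠ c
    · obtain ⟨hb1, hb2⟩ := piOk_getD hok (i := j.toNat - 1) (by omega)
      have hrec := ih (pi.getD (j.toNat - 1) 0) hb1 (by omega) (by omega)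
      simp only [kmpStep, if_pos hc]
      refine ⟨hrec.1, hrec.2.1, ?_⟩
      rw [hrec.2.2]
      simp only [chainGo, if_pos hc.1, List.mem_cons]
      constructor
      · rintro (h | ⟨b, hb, hbc⟩)
        · exact Or.inl h
        · exact Or.inr ⟨b, Or.inr hb, hbc⟩
      · rintro (h | ⟨b, hb | hb, h⟩)
        · exact Or.inl h
        · subst hb; exact absurd h hc.2
        · exact Or.inr ⟨b, hb, h⟩
    · simp only [kmpStep, if_neg hc]
      rw [Classical.not_and_iff_not_or_not, not_not] at hc
      by_cases hj : j > 0
      · have hm := hc.resolve_left (by omega)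
        refine ⟨⟨hj0, hjl⟩, Or.inl hm, ?_⟩
        simp only [chainGo, if_pos hj, List.mem_cons]
        exact ⟨fun h => Or.inr ⟨j, Or.inl rfl, h⟩, fun _ => hm⟩
      · have : j = 0 := by omega
        subst this
        refine ⟨⟨le_refl 0, by simpa using hjl⟩, ?_, by simp [chainGo]⟩
        by_cases h : seq.getD (Int.toNat 0) 0 = c
        · exact Or.inl h
        · exact Or.inr rfl
theorem piStep_inv (seq pi : List Int) (i : Nat) (hok : PiOk pi) (hlen : pi.length = i)
    (hi1 : 1 ≤ i) (hile : i < seq.length) :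
    (piStep seq pi i).length = i + 1 ∧ PiOk (piStep seq pi i) := by
  obtain ⟨hb1, hb2⟩ := piOk_getD hok (i := i - 1) (by omega)
  have hkc := kmp_chain seq pi (seq.getD i 0) seq.length (pi.getD (i-1) 0) hok hb1 (by omega) (by omega)
  set r := kmpStep seq pi (seq.getD i 0) seq.length (pi.getD (i-1) 0) with hr
  have hnew : 0 ≤ (if seq.getD r.toNat 0 = seq.getD i 0 then r + 1 else r) ∧
      (if seq.getD r.toNat 0 = seq.getD i 0 then r + 1 else r) ≤ (i : Int) := by
    have h1 := hkc.1.1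
    have h2 := hkc.1.2
    split <;> omega
  constructor
  · simp [piStep, hlen]
  · intro m hm
    simp only [piStep] at hm ⊢
    by_cases hlt : m < pi.length
    · rw [List.getElem_append_left hlt]; exact hok m hlt
    · have hmeq : m = pi.length := by simp at hm; omega
      rw [List.getElem_append_right (by omega)]
      simpa [hmeq, hlen] using hnew

theorem calcPi_fold_inv (seq : List Int) (m : Nat) (hm : m + 1 ≤ seq.length) :
    ((List.range' 1 m).foldl (piStep seq) [0]).length = m + 1 ∧
      PiOk ((List.range' 1 m).foldl (piStep seq) [0]) := by
  induction m with
  | zero =>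
    refine ⟨rfl, ?_⟩
    intro i h
    simp at h
    subst h; simp
  | succ g ih =>
    obtain ⟨hl, hok⟩ := ih (by omega)
    rw [List.range'_concat, List.foldl_append]
    simp only [Nat.one_mul, List.foldl_cons, List.foldl_nil]
    obtain ⟨h1, h2⟩ := piStep_inv seq _ (1 + g) hok (by omega) (by omega) (by omega)
    exact ⟨by rw [h1]; omega, h2⟩

theorem calcPi_length (seq : List Int) : (calcPi seq).length = seq.length := by
  unfold calcPi
  split
  next h => simp [h]
  next h => rw [(calcPi_fold_inv seq (seq.length - 1) (by omega)).1]; omega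

theorem calcPi_piOk (seq : List Int) : PiOk (calcPi seq) := by
  unfold calcPi
  split
  · intro i h; simp at h
  · exact (calcPi_fold_inv seq (seq.length - 1) (by omega)).2

theorem getD_append_lt (u : List Int) (v : List Int) (i : Nat) (h : i < u.length) :
    (u ++ v).getD i 0 = u.getD i 0 := by
  rw [List.getD_eq_getElem _ 0 (by simp; omega), List.getD_eq_getElem _ 0 h,
    List.getElem_append_left h]

theorem piStep_congr (u : List Int) (c : Int) (pi : List Int) (i : Nat)
    (hok : PiOk pi) (hlen : pi.length = i) (hi1 : 1 ≤ i) (hile : i < u.length) :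
    piStep (u ++ [c]) pi i = piStep u pi i := by
  have hl : (u ++ [c]).length = u.length + 1 := by simp
  obtain ⟨hb1, hb2⟩ := piOk_getD hok (i := i - 1) (by omega)
  have hagree : ∀ m, m < pi.length → (u ++ [c]).getD m 0 = u.getD m 0 := by
    intro m hmlt; exact getD_append_lt u [c] m (by omega)
  have hc : (u ++ [c]).getD i 0 = u.getD i 0 := getD_append_lt u [c] i hile
  have hstep : kmpStep (u ++ [c]) pi (u.getD i 0) (u ++ [c]).length (pi.getD (i-1) 0)
      = kmpStep u pi (u.getD i 0) u.length (pi.getD (i-1) 0) := by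
    rw [kmpStep_congr (u ++ [c]) u pi (u.getD i 0) (u ++ [c]).length (pi.getD (i-1) 0) hagree hok hb1 (by omega)]
    exact kmpStep_fuel u pi (u.getD i 0) (u ++ [c]).length u.length _ hok hb1 (by omega) (by omega) (by omega)
  have hkc := kmp_chain u pi (u.getD i 0) u.length (pi.getD (i-1) 0) hok hb1 (by omega) (by omega)
  simp only [piStep, hc, hstep]
  rw [getD_append_lt u [c] _ (by have := hkc.1.2; omega)]
theorem calcPi_fold_congr (u : List Int) (c : Int) (m : Nat) (hm : m + 1 ≤ u.length) :
    (List.range' 1 m).foldl (piStep (u ++ [c])) [0] = (List.range' 1 m).foldl (piStep u) [0] := by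
  induction m with
  | zero => rfl
  | succ g ih =>
    obtain ⟨hl, hok⟩ := calcPi_fold_inv u g (by omega)
    rw [List.range'_concat]
    simp only [Nat.one_mul, List.foldl_append, List.foldl_cons, List.foldl_nil]
    rw [ih (by omega)]
    exact piStep_congr u c _ (1+g) hok (by omega) (by omega) (by omega)

theorem calcPi_append (u : List Int) (c : Int) (hu : u ≠ []) :
    calcPi (u ++ [c]) = piStep (u ++ [c]) (calcPi u) u.length := by
  have hn : 1 ≤ u.length := List.length_pos_iff.mpr hu
  have hl : (u ++ [c]).length = u.length + 1 := by simp
  unfold calcPi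
  rw [if_neg (by omega), if_neg (by omega), hl]
  have h1 : u.length + 1 - 1 = (u.length - 1) + 1 := by omega
  rw [h1, List.range'_concat]
  simp only [Nat.one_mul, List.foldl_append, List.foldl_cons, List.foldl_nil]
  rw [calcPi_fold_congr u c (u.length - 1) (by omega)]
  have h2 : 1 + (u.length - 1) = u.length := by omega
  rw [h2]

theorem chainGo_mem (pi : List Int) (fuel : Nat) (j b : Int) (hok : PiOk pi) (hj0 : 0 ≤ j)
    (hjl : j.toNat < pi.length) (hb : b ∈ chainGo pi fuel j) : 0 ≤ b ∧ b.toNat < pi.length := by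
  induction fuel generalizing j with
  | zero => simp [chainGo] at hb
  | succ g ih =>
    by_cases hc : j > 0
    · simp only [chainGo, if_pos hc, List.mem_cons] at hb
      rcases hb with rfl | hb
      · exact ⟨hj0, hjl⟩
      · obtain ⟨h1, h2⟩ := piOk_getD hok (i := j.toNat - 1) (by omega)
        exact ih _ h1 (by omega) hb
    · simp [chainGo, if_neg hc] at hb

theorem isBordered_iff (u : List Int) (c : Int) (hu : u ≠ []) :
    (isBordered (u ++ [c]) = true) ↔
      (u.getD 0 0 = c ∨ ∃ b ∈ chainGo (calcPi u) u.length ((calcPi u).getD (u.length - 1) 0),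
        u.getD b.toNat 0 = c) := by
  have hn : 1 ≤ u.length := List.length_pos_iff.mpr hu
  have hl : (u ++ [c]).length = u.length + 1 := by simp
  have hok := calcPi_piOk u
  have hplen := calcPi_length u
  obtain ⟨hb1, hb2⟩ := piOk_getD hok (i := u.length - 1) (by omega)
  have hj0lt : ((calcPi u).getD (u.length - 1) 0).toNat < (calcPi u).length := by omega
  have hcd : (u ++ [c]).getD u.length 0 = c := by
    rw [List.getD_eq_getElem _ 0 (by omega), List.getElem_append_right (by omega)]
    simp
  have hkc := kmp_chain (u ++ [c]) (calcPi u) c (u ++ [c]).length ((calcPi u).getD (u.length - 1) 0)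
    hok hb1 (by omega) hj0lt
  set j0 := (calcPi u).getD (u.length - 1) 0 with hj0def
  set r := kmpStep (u ++ [c]) (calcPi u) c (u ++ [c]).length j0 with hrdef
  have hr0 := hkc.1.1
  have hrlt := hkc.1.2
  unfold isBordered
  rw [if_pos (by omega), calcPi_append u c hu, hl]
  simp only [piStep, Nat.add_sub_cancel, hcd]
  have hgetlast : ((calcPi u) ++ [if (u ++ [c]).getD r.toNat 0 = c then r + 1 else r]).getD u.length 0
      = (if (u ++ [c]).getD r.toNat 0 = c then r + 1 else r) := by
    rw [List.getD_eq_getElem _ 0 (by simp [hplen]), List.getElem_append_right (by omega)]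
    simp [hplen]
  rw [hgetlast]
  have hmatch_iff : ((if (u ++ [c]).getD r.toNat 0 = c then r + 1 else r) ≠ 0) ↔
      (u ++ [c]).getD r.toNat 0 = c := by
    by_cases hm : (u ++ [c]).getD r.toNat 0 = c
    · rw [if_pos hm]
      exact ⟨fun _ => hm, fun _ => by omega⟩
    · rw [if_neg hm]
      have hr0' : r = 0 := hkc.2.1.resolve_left hm
      exact ⟨fun hne => absurd hr0' hne, fun hmm => absurd hmm hm⟩
  rw [bne_iff_ne, hmatch_iff, hkc.2.2]
  have hg0 : (u ++ [c]).getD 0 0 = u.getD 0 0 := getD_append_lt u [c] 0 (by omega)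
  rw [hg0]
  have hchain : chainGo (calcPi u) (u ++ [c]).length j0 = chainGo (calcPi u) u.length j0 :=
    chainGo_fuel (calcPi u) _ _ j0 hok hb1 (by omega) (by omega) hj0lt
  rw [hchain]
  constructor
  · rintro (h | ⟨b, hb, hbc⟩)
    · exact Or.inl h
    · obtain ⟨hbl, hbr⟩ := chainGo_mem (calcPi u) u.length j0 b hok hb1 hj0lt hb
      rw [getD_append_lt u [c] b.toNat (by omega)] at hbc
      exact Or.inr ⟨b, hb, hbc⟩
  · rintro (h | ⟨b, hb, hbc⟩)
    · exact Or.inl h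
    · obtain ⟨hbl, hbr⟩ := chainGo_mem (calcPi u) u.length j0 b hok hb1 hj0lt hb
      rw [← getD_append_lt u [c] b.toNat (by omega)] at hbc
      exact Or.inr ⟨b, hb, hbc⟩
theorem filter_range_eq_sorted (L : List Int) (k : Int) :
    (PySem.List.pyRange 1 (k+1) 1).filter (fun c => decide (c ∈ L)) =
      PySem.List.sorted ((PySem.Set.ofList L).filter (fun c => decide (1 ≤ c ∧ c ≤ k))) (fun x => x) false := by
  symm
  apply PySem.List.sorted_eq_of_perm_of_pairwise_lt
  · rw [List.perm_ext_iff_of_nodup ((PySem.List.nodup_pyRange_one 1 (k+1)).filter _)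
      (PySem.Set.nodup_ofList L |>.filter _)]
    intro a
    simp only [List.mem_filter, PySem.List.mem_pyRange_one, PySem.Set.mem_ofList,
      decide_eq_true_eq]
    constructor
    · rintro ⟨⟨h1, h2⟩, h3⟩; exact ⟨h3, h1, by omega⟩
    · rintro ⟨h3, h1, h2⟩; exact ⟨⟨h1, by omega⟩, h3⟩
  · exact (PySem.List.pairwise_lt_pyRange_one 1 (k+1)).filter _

-- ===== VERDICT (by name: the statement is the Claim_ definition above) =====
theorem calc_X_naive_spec : Claim_equal_calc_X_naive := by
  intro u k _
  unfold Spec_calc_X_naive calc_X_naive calc_X_naive_alt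
  by_cases hu : u = []
  · subst hu
    have hB : ∀ c : Int, isBordered [c] = false := by
      intro c; simp [isBordered, calcPi]
    rw [PySem.List.foldl_append_if_eq_filter]
    rw [List.filter_eq_nil_iff.mpr (fun c _ => by simp [hB c])]
    simp
  · rw [if_neg (by simp [hu])]
    rw [PySem.List.foldl_append_if_eq_filter]
    have hpred : ∀ cc : Int, isBordered (u ++ [cc]) =
        decide (cc ∈ (u.getD 0 0 :: (chainGo (calcPi u) u.length ((calcPi u).getD (u.length - 1) 0)).map
          (fun b => u.getD b.toNat 0))) := by
      intro cc
      rw [Bool.eq_iff_iff]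
      rw [decide_eq_true_eq, isBordered_iff u cc hu]
      simp only [List.mem_cons, List.mem_map]
      constructor
      · rintro (h | ⟨b, hb, hbc⟩)
        · exact Or.inl h.symm
        · exact Or.inr ⟨b, hb, hbc⟩
      · rintro (h | ⟨b, hb, hbc⟩)
        · exact Or.inl h.symm
        · exact Or.inr ⟨b, hb, hbc⟩
    rw [List.filter_congr (fun c _ => hpred c)]
    exact filter_range_eq_sorted _ k
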